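-- pv_equiv track=rewrite | github.com/FrancescBellido/TFG_NarrativaDigital | RenpyProject/server.py | thereAreMayusAndMinus
-- ===== SOURCE A (Python) =====
-- def thereAreMayusAndMinus(text):
--     mayus = False
--     minus = False
--     for s in text:
--         if s == ' ' or s == 'A' or s == 'B' or s == 'C' or s == 'D' or s == 'E' or s == 'F' or s == 'G' or s == 'H' or s == 'I' or s == 'J' or s == 'K' or s == 'L' or s == 'M' or s == 'N' or s == 'O' or s == 'P' or s == 'Q' or s == 'R' or s == 'S' or s == 'T' or s == 'U' or s == 'V' or s == 'W' or s == 'X' or s == 'Y' or s == 'Z':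
--             mayus = True
--             break
--     if mayus == True:
--         for s in text:
--             if s != 'a' or s == 'b' or s == 'c' or s == 'd' or s == 'e' or s == 'f' or s == 'g' or s == 'h' or s == 'i' or s == 'j' or s == 'k' or s == 'l' or s == 'm' or s == 'n' or s == 'o' or s == 'p' or s == 'q' or s == 'r' or s == 's' or s == 't' or s == 'u' or s == 'v' or s == 'w' or s == 'x' or s == 'y' or s == 'z':
--                 minus = True
--                 break
--     return minus
-- ===== SOURCE B (Python) =====
-- MAYUS_OR_SPACE = " ABCDEFGHIJKLMNOPQRSTUVWXYZ"
--
-- def thereAreMayusAndMinus(text):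
--     return any(c in MAYUS_OR_SPACE for c in text)
-- ===== Notes on version B (the rewrite author's own statement) =====
-- stated objective: simpler
-- what changed: Collapsed A's two break-loops with 27-way and 26-way equality chains into a single any-pass testing membership of each character in a constant string of the space plus the uppercase letters (the proof shows A's second loop always agrees with the first); one pass and one membership test per char instead of interpreted or-chains.
import Mathlib
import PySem

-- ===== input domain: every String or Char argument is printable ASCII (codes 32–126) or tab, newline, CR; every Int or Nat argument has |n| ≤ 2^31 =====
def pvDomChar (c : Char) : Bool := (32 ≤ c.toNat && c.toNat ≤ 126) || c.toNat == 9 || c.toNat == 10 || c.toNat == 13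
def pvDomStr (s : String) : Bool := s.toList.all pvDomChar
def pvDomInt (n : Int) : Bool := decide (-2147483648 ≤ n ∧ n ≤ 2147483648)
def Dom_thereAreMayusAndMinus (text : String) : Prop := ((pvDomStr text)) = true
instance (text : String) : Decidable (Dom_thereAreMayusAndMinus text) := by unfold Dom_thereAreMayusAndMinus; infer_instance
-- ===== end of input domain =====

-- B replaces A's two break-loops (27-way / 26-way equality chains) by one pass testing membership in " A..Z"; objective: simpler.

-- ===== PORT A =====
-- the big or-condition of A's first loop, verbatim
def pvCond1 (s : Char) : Bool :=
  s == ' ' || s == 'A' || s == 'B' || s == 'C' || s == 'D' || s == 'E' || s == 'F' || s == 'G' ||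
  s == 'H' || s == 'I' || s == 'J' || s == 'K' || s == 'L' || s == 'M' || s == 'N' || s == 'O' ||
  s == 'P' || s == 'Q' || s == 'R' || s == 'S' || s == 'T' || s == 'U' || s == 'V' || s == 'W' ||
  s == 'X' || s == 'Y' || s == 'Z'

-- the or-condition of A's second loop, verbatim (note the first disjunct is s != 'a')
def pvCond2 (s : Char) : Bool :=
  s != 'a' || s == 'b' || s == 'c' || s == 'd' || s == 'e' || s == 'f' || s == 'g' ||
  s == 'h' || s == 'i' || s == 'j' || s == 'k' || s == 'l' || s == 'm' || s == 'n' || s == 'o' ||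
  s == 'p' || s == 'q' || s == 'r' || s == 's' || s == 't' || s == 'u' || s == 'v' || s == 'w' ||
  s == 'x' || s == 'y' || s == 'z'

-- first for-loop: sets mayus and breaks on the first char satisfying pvCond1
def pvLoop1 : List Char → Bool
  | [] => false
  | c :: rest => if pvCond1 c then true else pvLoop1 rest

-- second for-loop: sets minus and breaks on the first char satisfying pvCond2
def pvLoop2 : List Char → Bool
  | [] => false
  | c :: rest => if pvCond2 c then true else pvLoop2 rest

def thereAreMayusAndMinus (text : String) : Bool :=
  let mayus := pvLoop1 text.toList
  let minus := if mayus = true then pvLoop2 text.toList else false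
  minus

-- ===== PORT B =====
-- the constant string MAYUS_OR_SPACE of Source B, as its character list
def pvMayusOrSpace : List Char := " ABCDEFGHIJKLMNOPQRSTUVWXYZ".toList

def thereAreMayusAndMinus_alt (text : String) : Bool :=
  text.toList.any (fun c => pvMayusOrSpace.contains c)

-- ===== PRECONDITION & SPEC =====
def Spec_thereAreMayusAndMinus (text : String) (out : Bool) : Prop := out = thereAreMayusAndMinus_alt text
instance (text : String) (out : Bool) : Decidable (Spec_thereAreMayusAndMinus text out) := by unfold Spec_thereAreMayusAndMinus; infer_instance

-- ===== CLAIM (what is proved, stated in full; the proofs are below) =====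
def Claim_equal_thereAreMayusAndMinus : Prop := ∀ (text : String), Dom_thereAreMayusAndMinus text → Spec_thereAreMayusAndMinus text (thereAreMayusAndMinus text)

-- ===== LEMMAS AND PROOFS =====

-- per-character: membership in " A..Z" is exactly A's first-loop condition
theorem pv_contains_eq_cond1 (c : Char) : pvMayusOrSpace.contains c = pvCond1 c := by
  rw [show pvMayusOrSpace = [' ', 'A', 'B', 'C', 'D', 'E', 'F', 'G', 'H', 'I', 'J', 'K', 'L',
      'M', 'N', 'O', 'P', 'Q', 'R', 'S', 'T', 'U', 'V', 'W', 'X', 'Y', 'Z'] from by decide]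
  simp only [pvCond1, List.contains_cons, List.contains_nil, Bool.or_false, Bool.or_assoc,
    Bool.eq_iff_iff, Bool.or_eq_true, beq_iff_eq, decide_eq_true_eq]

-- any character passing the first loop's condition also passes the second loop's (it is not 'a')
theorem pv_cond1_imp_cond2 (c : Char) (h : pvCond1 c = true) : pvCond2 c = true := by
  have hne : c ≠ 'a' := by
    intro he; subst he; exact absurd h (by decide)
  simp [pvCond2, hne]

-- if the first loop breaks, so does the second
theorem pv_loop1_imp_loop2 (l : List Char) (h : pvLoop1 l = true) : pvLoop2 l = true := by
  induction l with
  | nil => simp [pvLoop1] at h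
  | cons c rest ih =>
    by_cases h1 : pvCond1 c = true
    · simp [pvLoop2, pv_cond1_imp_cond2 c h1]
    · have : pvLoop1 rest = true := by simpa [pvLoop1, h1] using h
      simp [pvLoop2, ih this]

-- B's single pass computes A's first loop
theorem pv_alt_eq_loop1 (l : List Char) :
    l.any (fun c => pvMayusOrSpace.contains c) = pvLoop1 l := by
  induction l with
  | nil => simp [pvLoop1]
  | cons c rest ih =>
    rw [List.any_cons, pv_contains_eq_cond1]
    cases hc : pvCond1 c with
    | true => simp [pvLoop1, hc]
    | false => simpa [pvLoop1, hc] using ih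

-- ===== VERDICT (by name: the statement is the Claim_ definition above) =====
theorem thereAreMayusAndMinus_spec : Claim_equal_thereAreMayusAndMinus := by
  intro text _
  unfold Spec_thereAreMayusAndMinus thereAreMayusAndMinus thereAreMayusAndMinus_alt
  rw [pv_alt_eq_loop1]
  cases h : pvLoop1 text.toList with
  | false => simp
  | true => simp [pv_loop1_imp_loop2 _ h]
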